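-- pv_equiv track=rewrite | github.com/Hellomaria-maker/-Algorithms | Recursion.py | max_search
-- ===== SOURCE A (Python) =====
-- def max_search(arr):
--     if len(arr) == 1:
--         return arr[0]
--     if arr[0] > arr[1]:
--         arr[1] = arr[0]
--         arr = arr[1:]
--         return max_search(arr)
--     if arr[0] < arr[1]:
--         arr = arr[1:]
--         return max_search(arr)
-- ===== SOURCE B (Python) =====
-- def max_search(arr):
--     m = arr[0]
--     for x in arr[1:]:
--         if x == m:
--             return None
--         if x > m:
--             m = x
--     return m
-- ===== Notes on version B (the rewrite author's own statement) =====
-- stated objective: faster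
-- what changed: Replaced the O(n^2) recursion that repeatedly slices the list by a single linear running-max pass (returning None when the running max equals the next element, as A does).
-- outside the precondition, e.g. on max_search([1, 1]): A returns None, B returns None
import Mathlib
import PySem

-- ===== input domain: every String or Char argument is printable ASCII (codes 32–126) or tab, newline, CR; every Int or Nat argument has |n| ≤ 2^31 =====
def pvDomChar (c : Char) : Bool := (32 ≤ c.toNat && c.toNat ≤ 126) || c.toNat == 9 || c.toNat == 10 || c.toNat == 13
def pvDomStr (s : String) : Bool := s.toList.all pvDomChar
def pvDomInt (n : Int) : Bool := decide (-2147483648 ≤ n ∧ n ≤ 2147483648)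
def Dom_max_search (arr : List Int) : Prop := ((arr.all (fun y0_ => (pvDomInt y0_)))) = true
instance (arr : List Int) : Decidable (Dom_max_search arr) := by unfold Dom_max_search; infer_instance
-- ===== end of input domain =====

-- B replaces A's slicing recursion by one linear running-max pass; equivalence is about the return
-- value only: A assigns arr[1] = arr[0] in place on its first step (observable to the caller), B does
-- not mutate its argument.

-- ===== PORT A =====
-- literal transliteration of A's recursion; the `0` arms are unreachable under Pre_max_search
-- (Python raises IndexError on [] and returns None when arr[0] == arr[1]).
def max_search (arr : List Int) : Int :=
  match arr with
  | [] => 0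
  | [x] => x
  | a :: b :: rest =>
      if a > b then max_search (a :: rest)
      else if a < b then max_search (b :: rest)
      else 0
termination_by arr.length

-- ===== PORT B =====
-- Source B's for-loop with early return; the `0` of the `x = m` branch stands for Source B's `return None`
-- (not an Int), unreachable under Pre_max_search.
def altLoop (m : Int) : List Int → Int
  | [] => m
  | y :: ys => if y = m then 0 else if y > m then altLoop y ys else altLoop m ys

def max_search_alt (arr : List Int) : Int :=
  match arr with
  | [] => 0   -- unreachable under Pre_max_search (Source B raises IndexError on [])
  | x :: xs => altLoop x xs

-- ===== PRECONDITION & SPEC =====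
-- Pre_ excludes the empty list (A raises IndexError) and any list in which some prefix maximum
-- equals the next element: there A falls off the end and returns None, which is not an Int.
def Pre_max_search (arr : List Int) : Prop :=
  arr ≠ [] ∧ ∀ i < arr.length - 1, (arr.take (i + 1)).max? ≠ arr[i + 1]?
instance (arr : List Int) : Decidable (Pre_max_search arr) := by unfold Pre_max_search; infer_instance

def pvWitness_max_search : List Int := [3, 1, 4, 2, 5]

def Spec_max_search (arr : List Int) (out : Int) : Prop := out = max_search_alt arr
instance (arr : List Int) (out : Int) : Decidable (Spec_max_search arr out) := by unfold Spec_max_search; infer_instance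

-- ===== CLAIM (what is proved, stated in full; the proofs are below) =====
def Claim_equal_max_search : Prop := ∀ (arr : List Int), Dom_max_search arr → Pre_max_search arr → Spec_max_search arr (max_search arr)

-- ===== LEMMAS AND PROOFS =====

-- one step of B's loop when the next element differs from the running max
lemma alt_step (a b : Int) (rest : List Int) (hab : b ≠ a) :
    altLoop a (b :: rest) = altLoop (max a b) rest := by
  by_cases h : b > a
  · simp [altLoop, hab, h, max_eq_right (le_of_lt h)]
  · have hba : b ≤ a := not_lt.mp h
    simp [altLoop, hab, h, max_eq_left hba]

lemma key : ∀ (rest : List Int) (a b : Int),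
    (∀ i < (a :: b :: rest).length - 1,
        ((a :: b :: rest).take (i + 1)).max? ≠ (a :: b :: rest)[i + 1]?) →
    max_search (a :: b :: rest) = max_search_alt (a :: b :: rest) := by
  intro rest
  induction rest with
  | nil =>
      intro a b h
      have hab : a ≠ b := by
        have := h 0 (by simp)
        simpa [List.max?] using this
      rcases lt_trichotomy a b with hlt | heq | hgt
      · simp [max_search, max_search_alt, altLoop, Ne.symm hab, not_lt.mpr (le_of_lt hlt), hlt]
      · exact absurd heq hab
      · simp [max_search, max_search_alt, altLoop, Ne.symm hab, hgt, not_lt.mpr (le_of_lt hgt)]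
  | cons c rest' ih =>
      intro a b h
      have hab : a ≠ b := by
        have := h 0 (by simp)
        simpa [List.max?] using this
      -- the shifted hypothesis for (max a b :: c :: rest')
      have hshift : ∀ i < ((max a b) :: c :: rest').length - 1,
          (((max a b) :: c :: rest').take (i + 1)).max? = ((a :: b :: c :: rest').take (i + 2)).max? := by
        intro i _
        simp [List.max?, List.foldl_cons]
      have h' : ∀ i < ((max a b) :: c :: rest').length - 1,
          (((max a b) :: c :: rest').take (i + 1)).max? ≠ ((max a b) :: c :: rest')[i + 1]? := by
        intro i hi
        have hi' : i + 1 < (a :: b :: c :: rest').length - 1 := by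
          simp only [List.length_cons] at hi ⊢; omega
        have h2 := h (i + 1) hi'
        rw [hshift i hi]
        simpa using h2
      have hrec := ih (max a b) c h'
      have hA : max_search (a :: b :: c :: rest') = max_search ((max a b) :: c :: rest') := by
        rcases lt_trichotomy a b with hlt | heq | hgt
        · rw [max_eq_right (le_of_lt hlt)]
          simp [max_search, not_lt.mpr (le_of_lt hlt), hlt]
        · exact absurd heq hab
        · rw [max_eq_left (le_of_lt hgt)]
          simp [max_search, hgt]
      have hB : max_search_alt (a :: b :: c :: rest') = max_search_alt ((max a b) :: c :: rest') := by
        simp only [max_search_alt]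
        exact alt_step a b (c :: rest') (Ne.symm hab)
      rw [hA, hB, hrec]

-- ===== VERDICT (by name: the statement is the Claim_ definition above) =====
theorem max_search_spec : Claim_equal_max_search := by
  intro arr _ hpre
  unfold Spec_max_search
  obtain ⟨hne, hcond⟩ := hpre
  match arr with
  | [] => exact absurd rfl hne
  | [x] => simp [max_search, max_search_alt, altLoop]
  | a :: b :: rest => exact key rest a b hcond
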